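-- pv_equiv track=rewrite | github.com/huggingface/transformers | longformer/tvm/_ffi/base.py | c2pyerror
-- ===== SOURCE A (Python) =====
-- def _valid_error_name(name):
--     """Check whether name is a valid error name."""
--     return all(x.isalnum() or x in "_." for x in name)
--
-- def _find_error_type(line):
--     """Find the error name given the first line of the error message.
--
--     Parameters
--     ----------
--     line : str
--         The first line of error message.
--
--     Returns
--     -------
--     name : str The error name
--     """
--     end_pos = line.find(":")
--     if end_pos == -1:
--         return None
--     err_name = line[:end_pos]
--     if _valid_error_name(err_name):
--         return err_name
--     return None
--
-- def c2pyerror(err_msg):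
--     """Translate C API error message to python style.
--
--     Parameters
--     ----------
--     err_msg : str
--         The error message.
--
--     Returns
--     -------
--     new_msg : str
--         Translated message.
--
--     err_type : str
--         Detected error type.
--     """
--     arr = err_msg.split("\n")
--     if arr[-1] == "":
--         arr.pop()
--     err_type = _find_error_type(arr[0])
--     trace_mode = False
--     stack_trace = []
--     message = []
--     for line in arr:
--         if trace_mode:
--             if line.startswith("  "):
--                 stack_trace.append(line)
--             else:
--                 trace_mode = False
--         if not trace_mode:
--             if line.startswith("Stack trace"):
--                 trace_mode = True
--             else:
--                 message.append(line)
--     out_msg = ""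
--     if stack_trace:
--         out_msg += "Traceback (most recent call last):\n"
--         out_msg += "\n".join(reversed(stack_trace)) + "\n"
--     out_msg += "\n".join(message)
--     return out_msg, err_type
-- ===== SOURCE B (Python) =====
-- def _valid_error_name(name):
--     """Check whether name is a valid error name."""
--     return all(x.isalnum() or x in "_." for x in name)
--
-- def _find_error_type(line):
--     """Find the error name given the first line of the error message."""
--     end_pos = line.find(":")
--     if end_pos == -1:
--         return None
--     err_name = line[:end_pos]
--     if _valid_error_name(err_name):
--         return err_name
--     return None
--
-- def c2pyerror(err_msg):
--     """Translate C API error message to python style.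
--
--     Staged version: first tag every line with whether it lies inside a
--     stack-trace run (a local DP over consecutive line pairs: a line is in
--     a run iff it is two-space indented and the previous line is a
--     'Stack trace' header or itself in a run), then extract stack_trace
--     and message by two independent filters over the tagged lines.
--     """
--     arr = err_msg.split("\n")
--     if arr[-1] == "":
--         arr.pop()
--     err_type = _find_error_type(arr[0])
--     # stage 1: tag each line
--     tagged = [(arr[0], False)]
--     for prev, cur in zip(arr, arr[1:]):
--         tagged.append((cur, cur.startswith("  ")
--                        and (tagged[-1][1] or prev.startswith("Stack trace"))))
--     # stage 2: independent filters
--     stack_trace = [ln for ln, t in tagged if t]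
--     message = [ln for ln, t in tagged
--                if not t and not ln.startswith("Stack trace")]
--     out_msg = ""
--     if stack_trace:
--         out_msg += "Traceback (most recent call last):\n"
--         out_msg += "\n".join(reversed(stack_trace)) + "\n"
--     out_msg += "\n".join(message)
--     return out_msg, err_type
-- ===== Notes on version B (the rewrite author's own statement) =====
-- stated objective: alternative
-- what changed: Replaced A's single interleaved trace_mode state machine by staged passes: a first pass tags every line with an in-stack-trace flag via a pairwise DP over consecutive lines, then stack_trace and message are extracted by two independent filters over the tagged list.
import Mathlib
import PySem

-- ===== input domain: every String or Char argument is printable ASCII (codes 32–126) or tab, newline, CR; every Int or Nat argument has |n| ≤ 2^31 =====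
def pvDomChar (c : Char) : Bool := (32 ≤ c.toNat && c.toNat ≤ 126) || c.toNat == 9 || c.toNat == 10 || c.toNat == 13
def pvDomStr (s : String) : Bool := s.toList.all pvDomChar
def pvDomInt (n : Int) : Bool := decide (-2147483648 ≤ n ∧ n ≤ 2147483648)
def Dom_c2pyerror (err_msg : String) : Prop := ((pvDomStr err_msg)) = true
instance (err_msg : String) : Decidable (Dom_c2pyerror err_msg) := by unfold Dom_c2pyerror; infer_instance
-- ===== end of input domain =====

-- B replaces A's interleaved trace_mode state machine by staged passes: a first pass
-- tags every line with an in-stack-trace flag (a pairwise DP over consecutive lines),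
-- then stack_trace and message are extracted by two independent filters; same cost,
-- alternative structure.

-- ===== PORT A =====
-- shared helpers: _valid_error_name and _find_error_type are identical in A and B
def validErrorName (name : String) : Bool :=
  name.toList.all (fun x => PySem.Chars.isalnum x || x == '_' || x == '.')

def findErrorType (line : String) : Option String :=
  let endPos := PySem.Str.find line ":"
  if endPos = -1 then none
  else
    let errName := PySem.Str.slice line none (some endPos)
    if validErrorName errName then some errName else none

-- out_msg assembly, identical code at the end of A and B
def buildOut (stackTrace message : List String) : String :=
  let outMsg := ""
  let outMsg := if !stackTrace.isEmpty then
      outMsg ++ "Traceback (most recent call last):\n"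
        ++ (PySem.Str.join "\n" stackTrace.reverse ++ "\n")
    else outMsg
  outMsg ++ PySem.Str.join "\n" message

-- the body of A's for-loop: state (trace_mode, stack_trace, message)
def aStep (st : Bool × List String × List String) (line : String) :
    Bool × List String × List String :=
  let p : Bool × List String :=
    if st.1 then
      (if PySem.Str.startswith line "  " then (st.1, st.2.1 ++ [line]) else (false, st.2.1))
    else (st.1, st.2.1)
  if !p.1 then
    (if PySem.Str.startswith line "Stack trace" then (true, p.2, st.2.2)
     else (p.1, p.2, st.2.2 ++ [line]))
  else (p.1, p.2, st.2.2)

def c2pyerror (err_msg : String) : String × Option String :=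
  let arr := (PySem.Str.split? err_msg "\n").getD []   -- sep "\n" ≠ "", so split? is always some
  let arr := if PySem.List.pyGet? arr (-1) = some "" then arr.dropLast else arr
  match PySem.List.pyGet? arr 0 with
  | none => ("", none)   -- Python raises IndexError here (only err_msg = ""); excluded by Pre_
  | some first =>
    let errType := findErrorType first
    let st := arr.foldl aStep (false, [], [])
    (buildOut st.2.1 st.2.2, errType)

-- ===== PORT B =====
-- the body of B's tagging loop: 'for prev, cur in zip(arr, arr[1:]): tagged.append(...)'
def tagStep (tagged : List (String × Bool)) (pc : String × String) : List (String × Bool) :=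
  tagged ++ [(pc.2, PySem.Str.startswith pc.2 "  "
      && (((PySem.List.pyGet? tagged (-1)).getD ("", false)).2   -- tagged[-1][1]; tagged is never empty
          || PySem.Str.startswith pc.1 "Stack trace"))]

def c2pyerror_alt (err_msg : String) : String × Option String :=
  let arr := (PySem.Str.split? err_msg "\n").getD []
  let arr := if PySem.List.pyGet? arr (-1) = some "" then arr.dropLast else arr
  match PySem.List.pyGet? arr 0 with
  | none => ("", none)   -- Python raises IndexError here (only err_msg = ""); excluded by Pre_
  | some first =>
    let errType := findErrorType first
    -- stage 1: tag each line with its in-stack-trace flag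
    let tagged := (arr.zip (PySem.List.slice arr (some 1) none)).foldl tagStep [(first, false)]
    -- stage 2: independent filters
    let stackTrace := (tagged.filter (fun p => p.2)).map Prod.fst
    let message := (tagged.filter
        (fun p => !p.2 && !PySem.Str.startswith p.1 "Stack trace")).map Prod.fst
    (buildOut stackTrace message, errType)

-- ===== PRECONDITION & SPEC =====
-- Pre_ excludes only err_msg = "", on which Python A (and B) raises IndexError at arr[0].
def Pre_c2pyerror (err_msg : String) : Prop := err_msg ≠ ""
instance (err_msg : String) : Decidable (Pre_c2pyerror err_msg) := by
  unfold Pre_c2pyerror; infer_instance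

def pvWitness_c2pyerror : String := "ValueError: bad\nStack trace\n  frame0\n"

def Spec_c2pyerror (err_msg : String) (out : String × Option String) : Prop := out = c2pyerror_alt err_msg
instance (err_msg : String) (out : String × Option String) : Decidable (Spec_c2pyerror err_msg out) := by unfold Spec_c2pyerror; infer_instance

-- ===== CLAIM (what is proved, stated in full; the proofs are below) =====
def Claim_equal_c2pyerror : Prop := ∀ (err_msg : String), Dom_c2pyerror err_msg → Pre_c2pyerror err_msg → Spec_c2pyerror err_msg (c2pyerror err_msg)

-- ===== LEMMAS AND PROOFS =====

-- proof-local names for the two prefix tests (kept folded so simp's Str→Chars bridge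
-- lemmas cannot interfere with case hypotheses about them)
def pvHdr (x : String) : Bool := PySem.Str.startswith x "Stack trace"
def pvInd (x : String) : Bool := PySem.Str.startswith x "  "

-- one step of A's loop, written with the two prefix tests factored out
lemma aStep_eq (m : Bool) (stk msg : List String) (x : String) :
    aStep (m, stk, msg) x
      = (m && pvInd x || pvHdr x,
         stk ++ (if m && pvInd x then [x] else []),
         msg ++ (if !(m && pvInd x) && !pvHdr x then [x] else [])) := by
  simp only [aStep]
  rw [show PySem.Str.startswith x "  " = pvInd x from rfl,
      show PySem.Str.startswith x "Stack trace" = pvHdr x from rfl]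
  cases m <;> cases hs : pvInd x <;> cases hh : pvHdr x <;> simp

-- one step of B's tagging loop on a nonempty accumulator
lemma tagStep_last (acc : List (String × Bool)) (prev : String) (b : Bool) (p c : String) :
    tagStep (acc ++ [(prev, b)]) (p, c)
      = (acc ++ [(prev, b)]) ++ [(c, pvInd c && (b || pvHdr p))] := by
  simp only [tagStep, PySem.List.pyGet?_neg_one_append_singleton, Option.getD_some]
  rw [show PySem.Str.startswith c "  " = pvInd c from rfl,
      show PySem.Str.startswith p "Stack trace" = pvHdr p from rfl]

-- reference form of B's tagging pass: tag each line of l given the previous line and its flag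
def tagF (prev : String) (b : Bool) : List String → List (String × Bool)
  | [] => []
  | c :: rest =>
    let f := pvInd c && (b || pvHdr prev)
    (c, f) :: tagF c f rest

-- B's fold builds exactly acc ++ tagF
lemma fold_tag (l : List String) : ∀ (prev : String) (b : Bool) (acc : List (String × Bool)),
    ((prev :: l).zip l).foldl tagStep (acc ++ [(prev, b)])
      = (acc ++ [(prev, b)]) ++ tagF prev b l := by
  induction l with
  | nil => intro prev b acc; simp [tagF]
  | cons c rest ih =>
    intro prev b acc
    calc ((prev :: c :: rest).zip (c :: rest)).foldl tagStep (acc ++ [(prev, b)])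
        = ((c :: rest).zip rest).foldl tagStep
            (tagStep (acc ++ [(prev, b)]) (prev, c)) := by simp [List.zip]
      _ = ((acc ++ [(prev, b)]) ++ [(c, pvInd c && (b || pvHdr prev))])
            ++ tagF c (pvInd c && (b || pvHdr prev)) rest := by
            rw [tagStep_last]; exact ih c _ (acc ++ [(prev, b)])
      _ = (acc ++ [(prev, b)]) ++ tagF prev b (c :: rest) := by
            simp [tagF]

-- the two filters of B, as functions of the tagged list
def filtT (tl : List (String × Bool)) : List String := (tl.filter (fun p => p.2)).map Prod.fst
def filtM (tl : List (String × Bool)) : List String :=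
  (tl.filter (fun p => !p.2 && !pvHdr p.1)).map Prod.fst

-- A's flag-driven fold, read off against the tagging: entering a line the mode is
-- t(prev) || header(prev)
lemma fold_a (l : List String) : ∀ (prev : String) (b : Bool) (stk msg : List String),
    (l.foldl aStep (b || pvHdr prev, stk, msg)).2
      = (stk ++ filtT (tagF prev b l), msg ++ filtM (tagF prev b l)) := by
  induction l with
  | nil => intro prev b stk msg; simp [tagF, filtT, filtM]
  | cons x rest ih =>
    intro prev b stk msg
    rw [List.foldl_cons, aStep_eq]
    rw [Bool.and_comm (b || pvHdr prev) (pvInd x)]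
    rw [ih x (pvInd x && (b || pvHdr prev))]
    simp only [tagF, filtT, filtM, List.filter_cons]
    by_cases hT : (pvInd x && (b || pvHdr prev)) = true <;>
      by_cases hh : pvHdr x = true <;>
      simp [hT, hh]

-- the post-split computation of A equals that of B, for any split line list
lemma core (arr : List String) :
    (match PySem.List.pyGet? arr 0 with
     | none => (("", none) : String × Option String)
     | some first =>
        (buildOut (arr.foldl aStep (false, [], [])).2.1 (arr.foldl aStep (false, [], [])).2.2,
         findErrorType first))
    = (match PySem.List.pyGet? arr 0 with
     | none => ("", none)
     | some first =>
        (buildOut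
          ((((arr.zip (PySem.List.slice arr (some 1) none)).foldl tagStep
              [(first, false)]).filter (fun p => p.2)).map Prod.fst)
          ((((arr.zip (PySem.List.slice arr (some 1) none)).foldl tagStep
              [(first, false)]).filter
                (fun p => !p.2 && !PySem.Str.startswith p.1 "Stack trace")).map Prod.fst),
         findErrorType first)) := by
  cases arr with
  | nil => rfl
  | cons a0 l =>
    rw [PySem.List.pyGet?_zero_cons]
    simp only []
    -- B side: tagged list
    have hslice : PySem.List.slice (a0 :: l) (some 1) none = l := by
      simpa using PySem.List.slice_from_one (a0 :: l)
    have hB : ((a0 :: l).zip (PySem.List.slice (a0 :: l) (some 1) none)).foldl tagStep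
        [(a0, false)] = (a0, false) :: tagF a0 false l := by
      rw [hslice]
      simpa using fold_tag l a0 false []
    -- A side: first step, then fold_a
    have hA0 : aStep (false, [], []) a0
        = (false || pvHdr a0, [], if pvHdr a0 then [] else [a0]) := by
      rw [aStep_eq]; cases hh : pvHdr a0 <;> simp
    have hAfold : ((a0 :: l).foldl aStep (false, [], [])).2
        = ([] ++ filtT (tagF a0 false l),
           (if pvHdr a0 then [] else [a0]) ++ filtM (tagF a0 false l)) := by
      rw [List.foldl_cons, hA0, fold_a]
    have hstk : ((a0 :: l).foldl aStep (false, [], [])).2.1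
        = filtT ((a0, false) :: tagF a0 false l) := by
      rw [hAfold]; simp [filtT]
    have hmsg : ((a0 :: l).foldl aStep (false, [], [])).2.2
        = filtM ((a0, false) :: tagF a0 false l) := by
      rw [hAfold]; simp only [filtM, List.filter_cons]
      cases hh : pvHdr a0 <;> simp
    rw [show (fun (p : String × Bool) => !p.2 && !PySem.Str.startswith p.1 "Stack trace")
          = (fun (p : String × Bool) => !p.2 && !pvHdr p.1) from rfl]
    rw [hB, hstk, hmsg]
    simp only [filtT, filtM]

-- ===== VERDICT (by name: the statement is the Claim_ definition above) =====
theorem c2pyerror_spec : Claim_equal_c2pyerror := by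
  intro err_msg _ _
  show c2pyerror err_msg = c2pyerror_alt err_msg
  exact core _
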